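-- pv_equiv track=rewrite | github.com/Superposition28/Model_Assets | Tools/blender/test/io_import_simpson_game_addon-test/model.py | strip2face
-- ===== SOURCE A (Python) =====
-- def strip2face(strip: list) -> list:
--     """Converts a triangle strip into a list of triangle faces."""
--     # log_to_blender(f"[Strip2Face] Converting strip of length {len(strip)} to faces", to_blender_editor=False) # Console only - too chatty
--     flipped = False
--     tmpTable = []
--     # Need at least 3 indices to form a triangle strip
--     if len(strip) < 3:
--         # log_to_blender(f"[Strip2Face] Strip too short ({len(strip)}) to form faces. Skipping.", to_blender_editor=False) # Console only - too chatty
--         return []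
--
--     for x in range(len(strip)-2):
--         v1 = strip[x]
--         v2 = strip[x+1]
--         v3 = strip[x+2]
--         # Check for degenerate triangles (indices are the same)
--         if v1 == v2 or v1 == v3 or v2 == v3:
--             # log_to_blender(f"[Strip2Face] Skipping degenerate face in strip at index {x} with indices ({v1}, {v2}, {v3})", to_blender_editor=False) # Console only - too chatty
--             # Even if degenerate, the 'flipped' state still needs to toggle for the next potential face
--             flipped = not flipped # Still flip for correct winding of subsequent faces
--             continue # Skip this specific face
--
--         if flipped:
--             tmpTable.append((v3, v2, v1)) # Reversed winding for flipped faces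
--         else:
--             tmpTable.append((v2, v3, v1)) # Standard winding
--         flipped = not flipped # Toggle flipped state for the next iteration
--
--     # log_to_blender(f"[Strip2Face] Generated {len(tmpTable)} faces from strip.", to_blender_editor=False) # Console only - too chatty
--     return tmpTable
-- ===== SOURCE B (Python) =====
-- def strip2face(strip: list) -> list:
--     """Converts a triangle strip into a list of triangle faces."""
--     n = len(strip)
--     faces = []
--     i = 0
--     while i + 3 <= n:
--         # even window: standard winding
--         a, b, c = strip[i], strip[i + 1], strip[i + 2]
--         if not (a == b or a == c or b == c):
--             faces.append((b, c, a))
--         # odd window: reversed winding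
--         if i + 4 <= n:
--             d = strip[i + 3]
--             if not (b == c or b == d or c == d):
--                 faces.append((d, c, b))
--         i += 2
--     return faces
-- ===== Notes on version B (the rewrite author's own statement) =====
-- stated objective: alternative
-- what changed: Eliminated the mutable `flipped` toggle entirely by unrolling the scan two windows per step: each iteration emits the even-position window with standard winding and the odd-position window with reversed winding directly, advancing the index by 2, so no winding state or parity test exists; the len<3 guard disappears into the loop condition.
import Mathlib
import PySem

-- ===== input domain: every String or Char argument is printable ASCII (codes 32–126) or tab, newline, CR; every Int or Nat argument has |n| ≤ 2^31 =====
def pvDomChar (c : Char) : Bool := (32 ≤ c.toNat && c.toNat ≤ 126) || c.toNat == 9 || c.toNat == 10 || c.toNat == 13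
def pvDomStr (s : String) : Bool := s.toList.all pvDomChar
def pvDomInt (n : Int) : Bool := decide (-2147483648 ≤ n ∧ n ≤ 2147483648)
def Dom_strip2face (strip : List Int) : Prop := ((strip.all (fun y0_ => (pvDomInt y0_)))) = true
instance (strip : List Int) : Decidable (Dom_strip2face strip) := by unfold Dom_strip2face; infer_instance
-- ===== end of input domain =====

-- B removes A's mutable `flipped` toggle by unrolling the scan two windows per step, emitting the
-- even window with standard winding and the odd window with reversed winding directly (alternative).

-- ===== PORT A =====
-- A's loop body (the code inside `for x in range(len(strip)-2)`), state = (flipped, tmpTable)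
def pvStepA (strip : List Int) (st : Bool × List (Int × Int × Int)) (x : Int) :
    Bool × List (Int × Int × Int) :=
  let v1 := PySem.List.pyGetD strip x 0        -- index always in range in this loop
  let v2 := PySem.List.pyGetD strip (x + 1) 0
  let v3 := PySem.List.pyGetD strip (x + 2) 0
  if v1 = v2 ∨ v1 = v3 ∨ v2 = v3 then
    (!st.1, st.2)                               -- degenerate: still toggle flipped
  else if st.1 then
    (!st.1, st.2 ++ [(v3, v2, v1)])
  else
    (!st.1, st.2 ++ [(v2, v3, v1)])

def strip2face (strip : List Int) : List (Int × Int × Int) :=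
  if strip.length < 3 then []
  else
    ((PySem.List.pyRange 0 ((strip.length : Int) - 2) 1).foldl (pvStepA strip)
      (false, ([] : List (Int × Int × Int)))).2

-- ===== PORT B =====
-- B's while loop: index i advances by 2, two windows handled per step (all indices in range).
def pvGoB (strip : List Int) (n i : Nat) (faces : List (Int × Int × Int)) :
    List (Int × Int × Int) :=
  if _h : i + 3 ≤ n then
    let a := strip.getD i 0
    let b := strip.getD (i + 1) 0
    let c := strip.getD (i + 2) 0
    let faces1 := if a = b ∨ a = c ∨ b = c then faces else faces ++ [(b, c, a)]
    let faces2 :=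
      if i + 4 ≤ n then
        let d := strip.getD (i + 3) 0
        if b = c ∨ b = d ∨ c = d then faces1 else faces1 ++ [(d, c, b)]
      else faces1
    pvGoB strip n (i + 2) faces2
  else faces
termination_by n - i

def strip2face_alt (strip : List Int) : List (Int × Int × Int) :=
  pvGoB strip strip.length 0 []

-- ===== PRECONDITION & SPEC =====
def Spec_strip2face (strip : List Int) (out : List (Int × Int × Int)) : Prop := out = strip2face_alt strip
instance (strip : List Int) (out : List (Int × Int × Int)) : Decidable (Spec_strip2face strip out) := by unfold Spec_strip2face; infer_instance

-- ===== CLAIM (what is proved, stated in full; the proofs are below) =====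
def Claim_equal_strip2face : Prop := ∀ (strip : List Int), Dom_strip2face strip → Spec_strip2face strip (strip2face strip)

-- ===== LEMMAS AND PROOFS =====

-- common recursive characterisation: one face per window, winding from `flip`, toggling each step
def pvCore (flip : Bool) : List Int → List (Int × Int × Int)
  | a :: b :: c :: rest =>
      (if a = b ∨ a = c ∨ b = c then [] else [if flip then (c, b, a) else (b, c, a)]) ++
        pvCore (!flip) (b :: c :: rest)
  | _ => []
  termination_by l => l.length

lemma pvCore_short (flip : Bool) (l : List Int) (h : l.length < 3) : pvCore flip l = [] := by
  match l with
  | [] => simp [pvCore]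
  | [_] => simp [pvCore]
  | [_, _] => simp [pvCore]
  | _ :: _ :: _ :: _ => simp at h; omega

lemma pvCore_cons3 (flip : Bool) (a b c : Int) (rest : List Int) :
    pvCore flip (a :: b :: c :: rest)
      = (if a = b ∨ a = c ∨ b = c then [] else [if flip then (c, b, a) else (b, c, a)]) ++
          pvCore (!flip) (b :: c :: rest) := by
  rw [pvCore]

lemma pvFoldA_eq_core (strip : List Int) (n : Nat) :
    ∀ (k : Nat) (f : Bool) (acc : List (Int × Int × Int)), strip.length = k + 2 + n →
    ((PySem.List.pyRange (k : Int) ((strip.length : Int) - 2) 1).foldl (pvStepA strip)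
      (f, acc)).2 = acc ++ pvCore f (strip.drop k) := by
  induction n with
  | zero =>
    intro k f acc hlen
    have hnil : PySem.List.pyRange (k : Int) ((strip.length : Int) - 2) 1 = [] := by
      apply PySem.List.pyRange_one_eq_nil; omega
    have : (strip.drop k).length < 3 := by simp [hlen]
    rw [hnil]
    simp [pvCore_short f _ this]
  | succ n ih =>
    intro k f acc hlen
    have hk : k < strip.length := by omega
    have hk1 : k + 1 < strip.length := by omega
    have hk2 : k + 2 < strip.length := by omega
    have hcons : PySem.List.pyRange (k : Int) ((strip.length : Int) - 2) 1
        = (k : Int) :: PySem.List.pyRange ((k : Int) + 1) ((strip.length : Int) - 2) 1 := by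
      apply PySem.List.pyRange_one_cons; omega
    have hg1 : PySem.List.pyGetD strip ((k : Int)) 0 = strip[k] := by
      rw [PySem.List.pyGetD_natCast]; exact List.getD_eq_getElem strip 0 hk
    have hg2 : PySem.List.pyGetD strip ((k : Int) + 1) 0 = strip[k + 1] := by
      rw [show ((k : Int) + 1) = (((k + 1 : Nat)) : Int) from by push_cast; ring,
        PySem.List.pyGetD_natCast]
      exact List.getD_eq_getElem strip 0 hk1
    have hg3 : PySem.List.pyGetD strip ((k : Int) + 2) 0 = strip[k + 2] := by
      rw [show ((k : Int) + 2) = (((k + 2 : Nat)) : Int) from by push_cast; ring,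
        PySem.List.pyGetD_natCast]
      exact List.getD_eq_getElem strip 0 hk2
    have hdrop : strip.drop k = strip[k] :: strip[k + 1] :: strip[k + 2] :: strip.drop (k + 3) := by
      rw [List.drop_eq_getElem_cons hk, List.drop_eq_getElem_cons hk1, List.drop_eq_getElem_cons hk2]
    have hdrop1 : strip.drop (k + 1) = strip[k + 1] :: strip[k + 2] :: strip.drop (k + 3) := by
      rw [List.drop_eq_getElem_cons hk1, List.drop_eq_getElem_cons hk2]
    have hstep : pvStepA strip (f, acc) (k : Int)
        = (if strip[k] = strip[k + 1] ∨ strip[k] = strip[k + 2] ∨ strip[k + 1] = strip[k + 2] then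
            (!f, acc)
          else if f then (!f, acc ++ [(strip[k + 2], strip[k + 1], strip[k])])
          else (!f, acc ++ [(strip[k + 1], strip[k + 2], strip[k])])) := by
      simp only [pvStepA, hg1, hg2, hg3]
    have hk1c : ((k : Int) + 1) = (((k + 1 : Nat)) : Int) := by push_cast; ring
    rw [hcons, List.foldl_cons, hstep]
    by_cases hdeg : strip[k] = strip[k + 1] ∨ strip[k] = strip[k + 2] ∨ strip[k + 1] = strip[k + 2]
    · rw [if_pos hdeg, hk1c, ih (k + 1) (!f) acc (by omega), hdrop, hdrop1,
        pvCore_cons3, if_pos hdeg]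
      simp
    · rw [if_neg hdeg]
      by_cases hf : f
      · rw [if_pos hf, hk1c, ih (k + 1) (!f) _ (by omega), hdrop, hdrop1,
          pvCore_cons3, if_neg hdeg]
        simp [hf]
      · rw [if_neg hf, hk1c, ih (k + 1) (!f) _ (by omega), hdrop, hdrop1,
          pvCore_cons3, if_neg hdeg]
        simp [hf]

lemma pvGoB_eq_core (strip : List Int) (m : Nat) :
    ∀ (i : Nat) (faces : List (Int × Int × Int)), strip.length ≤ i + m →
    pvGoB strip strip.length i faces = faces ++ pvCore false (strip.drop i) := by
  induction m with
  | zero =>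
    intro i faces hm
    rw [pvGoB]
    have h3 : ¬ (i + 3 ≤ strip.length) := by omega
    rw [dif_neg h3, pvCore_short false _ (by simp; omega)]
    simp
  | succ m ih =>
    intro i faces hm
    rw [pvGoB]
    by_cases h3 : i + 3 ≤ strip.length
    · rw [dif_pos h3]
      have hi : i < strip.length := by omega
      have hi1 : i + 1 < strip.length := by omega
      have hi2 : i + 2 < strip.length := by omega
      have hg1 : strip.getD i 0 = strip[i] := List.getD_eq_getElem strip 0 hi
      have hg2 : strip.getD (i + 1) 0 = strip[i + 1] := List.getD_eq_getElem strip 0 hi1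
      have hg3 : strip.getD (i + 2) 0 = strip[i + 2] := List.getD_eq_getElem strip 0 hi2
      have hdrop : strip.drop i
          = strip[i] :: strip[i + 1] :: strip[i + 2] :: strip.drop (i + 3) := by
        rw [List.drop_eq_getElem_cons hi, List.drop_eq_getElem_cons hi1,
          List.drop_eq_getElem_cons hi2]
      have hdrop2 : strip.drop (i + 2) = strip[i + 2] :: strip.drop (i + 3) :=
        List.drop_eq_getElem_cons hi2
      simp only [hg1, hg2, hg3]
      rw [ih (i + 2) _ (by omega), hdrop]
      by_cases h4 : i + 4 ≤ strip.length
      · have hi3 : i + 3 < strip.length := by omega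
        have hg4 : strip.getD (i + 3) 0 = strip[i + 3] := List.getD_eq_getElem strip 0 hi3
        have hdrop3 : strip.drop (i + 3) = strip[i + 3] :: strip.drop (i + 4) :=
          List.drop_eq_getElem_cons hi3
        rw [if_pos h4]
        simp only [hg4]
        rw [hdrop2, hdrop3, pvCore_cons3, pvCore_cons3]
        by_cases hdA : strip[i] = strip[i+1] ∨ strip[i] = strip[i+2] ∨ strip[i+1] = strip[i+2] <;>
          by_cases hdB : strip[i+1] = strip[i+2] ∨ strip[i+1] = strip[i+3] ∨ strip[i+2] = strip[i+3] <;>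
            simp [hdA, hdB]
      · rw [if_neg h4]
        have hrest : strip.drop (i + 3) = [] := by
          apply List.drop_eq_nil_of_le; omega
        rw [hdrop2, hrest, pvCore_cons3]
        have e1 : pvCore false [strip[i + 2]] = [] := pvCore_short _ _ (by simp)
        have e2 : pvCore (!false) [strip[i + 1], strip[i + 2]] = [] := pvCore_short _ _ (by simp)
        rw [e1, e2]
        by_cases hdA : strip[i] = strip[i+1] ∨ strip[i] = strip[i+2] ∨ strip[i+1] = strip[i+2] <;>
          simp [hdA]
    · rw [dif_neg h3, pvCore_short false _ (by simp; omega)]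
      simp

-- ===== VERDICT (by name: the statement is the Claim_ definition above) =====
theorem strip2face_spec : Claim_equal_strip2face := by
  intro strip _
  unfold Spec_strip2face strip2face strip2face_alt
  rw [pvGoB_eq_core strip strip.length 0 [] (by omega)]
  by_cases h : strip.length < 3
  · rw [if_pos h]
    simp [pvCore_short false strip (by simpa using h)]
  · rw [if_neg h]
    have ha := pvFoldA_eq_core strip (strip.length - 2) 0 false [] (by omega)
    simp only [Nat.cast_zero] at ha
    rw [ha]
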